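-- pv_equiv track=rewrite | github.com/roshande/codingWebsites | Codechef/Contest/Jan-challenge/HP18/hp18.py | count_multiples
-- ===== SOURCE A (Python) =====
-- def count_multiples(seq, a, b):
--     ma, mb, mab = 0, 0, 0
--     for num in seq:
--         if num%a == 0:
--             ma += 1
--             if num%b == 0:
--                 mab += 1
--         elif num%b == 0:
--             mb += 1
--     return ma,mb,mab
-- ===== SOURCE B (Python) =====
-- def count_multiples(seq, a, b):
--     # Frequency-table algorithm: tally each distinct value once, then test
--     # divisibility once per distinct value and weight by its multiplicity.
--     freq = {}
--     for num in seq: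
--         freq[num] = freq.get(num, 0) + 1
--     ma = mb = mab = 0
--     for num, c in freq.items():
--         if num % a == 0:
--             ma += c
--         if num % b == 0:
--             mb += c
--         if num % a == 0 and num % b == 0:
--             mab += c
--     return ma, mb - mab, mab
-- ===== Notes on version B (the rewrite author's own statement) =====
-- stated objective: alternative
-- what changed: B first builds a frequency table of the sequence, then performs the divisibility tests once per DISTINCT value, weighting each by its multiplicity, and derives the b-only count by inclusion-exclusion (mb - mab); A tests every element with coupled if/elif counters.
-- outside the precondition, e.g. on count_multiples([1], 0, 2): A raises ZeroDivisionError, B raises ZeroDivisionError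
import Mathlib
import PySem

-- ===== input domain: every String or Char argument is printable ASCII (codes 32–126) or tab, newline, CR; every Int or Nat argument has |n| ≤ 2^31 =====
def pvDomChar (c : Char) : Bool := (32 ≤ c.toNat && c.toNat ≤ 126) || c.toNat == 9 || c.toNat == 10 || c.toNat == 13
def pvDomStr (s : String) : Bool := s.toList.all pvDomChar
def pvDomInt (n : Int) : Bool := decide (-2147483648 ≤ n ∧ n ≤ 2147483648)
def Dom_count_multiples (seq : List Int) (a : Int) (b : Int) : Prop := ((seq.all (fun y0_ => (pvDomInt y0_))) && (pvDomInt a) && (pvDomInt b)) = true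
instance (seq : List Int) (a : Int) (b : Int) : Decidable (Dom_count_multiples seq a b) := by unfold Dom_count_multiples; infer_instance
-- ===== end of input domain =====

-- B builds a frequency table first and then runs the divisibility tests once per DISTINCT value,
-- weighting by multiplicity and deriving the b-only count by inclusion-exclusion; same result, different algorithm.

-- ===== PORT A =====
-- Port of A: one pass, coupled if/elif counters.
def count_multiples (seq : List Int) (a : Int) (b : Int) : Int × Int × Int :=
  seq.foldl (fun (s : Int × Int × Int) num =>
    let (ma, mb, mab) := s
    if PySem.Int.mod num a = 0 then
      if PySem.Int.mod num b = 0 then (ma + 1, mb, mab + 1) else (ma + 1, mb, mab)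
    else if PySem.Int.mod num b = 0 then (ma, mb + 1, mab)
    else (ma, mb, mab)) (0, 0, 0)

-- ===== PORT B =====
def count_multiples_alt (seq : List Int) (a : Int) (b : Int) : Int × Int × Int :=
  let freq := seq.foldl (fun (d : PySem.Dict Int Int) num => d.insert num (d.getD num 0 + 1)) PySem.Dict.empty
  let st := freq.items.foldl (fun (s : Int × Int × Int) kc =>
    let (num, c) := kc
    let ma := if PySem.Int.mod num a = 0 then s.1 + c else s.1
    let mb := if PySem.Int.mod num b = 0 then s.2.1 + c else s.2.1
    let mab := if PySem.Int.mod num a = 0 ∧ PySem.Int.mod num b = 0 then s.2.2 + c else s.2.2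
    (ma, mb, mab)) (0, 0, 0)
  (st.1, st.2.1 - st.2.2, st.2.2)

-- ===== PRECONDITION & SPEC =====
-- Pre_ excludes exactly the inputs where Python A raises ZeroDivisionError: a nonempty seq with a = 0 or b = 0.
def Pre_count_multiples (seq : List Int) (a : Int) (b : Int) : Prop := seq = [] ∨ (a ≠ 0 ∧ b ≠ 0)
instance (seq : List Int) (a : Int) (b : Int) : Decidable (Pre_count_multiples seq a b) := by unfold Pre_count_multiples; infer_instance
def pvWitness_count_multiples : List Int × Int × Int := ([6, 4, 9, 7, 6], 2, 3)
def Spec_count_multiples (seq : List Int) (a : Int) (b : Int) (out : Int × Int × Int) : Prop := out = count_multiples_alt seq a b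
instance (seq : List Int) (a : Int) (b : Int) (out : Int × Int × Int) : Decidable (Spec_count_multiples seq a b out) := by unfold Spec_count_multiples; infer_instance

-- ===== CLAIM (what is proved, stated in full; the proofs are below) =====
def Claim_equal_count_multiples : Prop := ∀ (seq : List Int) (a : Int) (b : Int), Dom_count_multiples seq a b → Pre_count_multiples seq a b → Spec_count_multiples seq a b (count_multiples seq a b)

-- ===== LEMMAS AND PROOFS =====

-- Indicator sum of a decidable predicate over a list (proof-only helper).
def indSum (p : Int → Prop) [DecidablePred p] (xs : List Int) : Int :=
  (xs.map (fun n => if p n then (1 : Int) else 0)).sum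

-- A's fold computes the three indicator sums.
theorem A_char (a b : Int) (seq : List Int) (x y z : Int) :
    seq.foldl (fun (s : Int × Int × Int) num =>
      let (ma, mb, mab) := s
      if PySem.Int.mod num a = 0 then
        if PySem.Int.mod num b = 0 then (ma + 1, mb, mab + 1) else (ma + 1, mb, mab)
      else if PySem.Int.mod num b = 0 then (ma, mb + 1, mab)
      else (ma, mb, mab)) (x, y, z)
    = (x + indSum (fun n => PySem.Int.mod n a = 0) seq,
       y + indSum (fun n => ¬ PySem.Int.mod n a = 0 ∧ PySem.Int.mod n b = 0) seq,
       z + indSum (fun n => PySem.Int.mod n a = 0 ∧ PySem.Int.mod n b = 0) seq) := by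
  induction seq generalizing x y z with
  | nil => simp [indSum]
  | cons h t ih =>
    simp only [List.foldl_cons, indSum, List.map_cons, List.sum_cons]
    by_cases ha : PySem.Int.mod h a = 0 <;> by_cases hb : PySem.Int.mod h b = 0 <;>
      simp only [ha, hb, if_true, if_false, and_self, and_true, and_false, true_and,
        false_and, not_true, not_false_iff, if_pos, if_neg, not_false_eq_true] <;>
      rw [ih] <;> unfold indSum <;> ring_nf

-- B's inner fold over an items list accumulates the weighted indicator sums.
theorem B_fold (a b : Int) (l : List (Int × Int)) (x y z : Int) :
    l.foldl (fun (s : Int × Int × Int) kc =>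
      let (num, c) := kc
      let ma := if PySem.Int.mod num a = 0 then s.1 + c else s.1
      let mb := if PySem.Int.mod num b = 0 then s.2.1 + c else s.2.1
      let mab := if PySem.Int.mod num a = 0 ∧ PySem.Int.mod num b = 0 then s.2.2 + c else s.2.2
      (ma, mb, mab)) (x, y, z)
    = (x + (l.map (fun kc => if PySem.Int.mod kc.1 a = 0 then kc.2 else 0)).sum,
       y + (l.map (fun kc => if PySem.Int.mod kc.1 b = 0 then kc.2 else 0)).sum,
       z + (l.map (fun kc => if PySem.Int.mod kc.1 a = 0 ∧ PySem.Int.mod kc.1 b = 0 then kc.2 else 0)).sum) := by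
  induction l generalizing x y z with
  | nil => simp
  | cons h t ih =>
    simp only [List.foldl_cons, List.map_cons, List.sum_cons]
    rw [ih]
    by_cases ha : PySem.Int.mod h.1 a = 0 <;> by_cases hb : PySem.Int.mod h.1 b = 0 <;>
      simp only [ha, hb, if_true, if_pos, and_self, if_neg, not_false_iff, and_false,
        false_and, true_and, not_true] <;>
      simp [Prod.ext_iff] <;> ring_nf <;> exact ⟨trivial, trivial, trivial⟩

-- Summing 'if k = x then f k else 0' over a nodup list containing x yields f x.
theorem sum_ite_eq_of_nodup (l : List Int) (x : Int) (f : Int → Int)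
    (hl : l.Nodup) (hx : x ∈ l) :
    (l.map (fun k => if k = x then f k else 0)).sum = f x := by
  induction l with
  | nil => cases hx
  | cons h t ih =>
    simp only [List.map_cons, List.sum_cons]
    rcases List.mem_cons.mp hx with rfl | hxt
    · have hnot : x ∉ t := (List.nodup_cons.mp hl).1
      have : (t.map (fun k => if k = x then f k else 0)).sum = 0 := by
        apply List.sum_eq_zero
        intro v hv
        rcases List.mem_map.mp hv with ⟨k, hk, hkv⟩
        have : k ≠ x := fun h' => hnot (h' ▸ hk)
        simpa [this] using hkv.symm
      simp [this]
    · have hne : h ≠ x := fun h' => ((List.nodup_cons.mp hl).1) (h' ▸ hxt)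
      rw [ih (List.nodup_cons.mp hl).2 hxt]
      simp [hne]

-- The weighted sum over any nodup superset of xs's values equals the plain indicator sum over xs.
theorem counter_sum (p : Int → Prop) [DecidablePred p] (l xs : List Int)
    (hl : l.Nodup) (hsub : ∀ x ∈ xs, x ∈ l) :
    (l.map (fun k => if p k then (xs.count k : Int) else 0)).sum = indSum p xs := by
  induction xs with
  | nil =>
    simp only [indSum, List.map_nil, List.sum_nil]
    apply List.sum_eq_zero
    intro v hv
    rcases List.mem_map.mp hv with ⟨k, _, hkv⟩
    simpa [List.count_nil] using hkv.symm
  | cons x t ih =>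
    have hx : x ∈ l := hsub x (by simp)
    have hsub' : ∀ y ∈ t, y ∈ l := fun y hy => hsub y (by simp [hy])
    have hsplit : ∀ k : Int,
        (if p k then ((x :: t).count k : Int) else 0)
        = (if p k then (t.count k : Int) else 0) + (if k = x then (if p k then 1 else 0) else 0) := by
      intro k
      have hc : (((x :: t).count k : Int)) = (t.count k : Int) + (if k = x then 1 else 0) := by
        by_cases hk : k = x <;> simp [List.count_cons, hk] <;> (try exact Ne.symm hk)
      rw [hc]
      by_cases hk : k = x
      · subst hk; by_cases hp : p k <;> simp [hp]
      · by_cases hp : p k <;> simp [hp, hk]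
    calc (l.map (fun k => if p k then ((x :: t).count k : Int) else 0)).sum
        = (l.map (fun k => (if p k then (t.count k : Int) else 0)
            + (if k = x then (if p k then 1 else 0) else 0))).sum := by
          congr 1; exact List.map_congr_left (fun k _ => hsplit k)
      _ = (l.map (fun k => if p k then (t.count k : Int) else 0)).sum
            + (l.map (fun k => if k = x then (if p k then 1 else 0) else 0)).sum := by
          rw [← List.sum_map_add]
      _ = indSum p t + (if p x then 1 else 0) := by
          rw [ih hsub', sum_ite_eq_of_nodup l x _ hl hx]
      _ = indSum p (x :: t) := by
          simp only [indSum, List.map_cons, List.sum_cons]; ring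

-- Inclusion–exclusion at the level of indicator sums.
theorem indSum_split (a b : Int) (xs : List Int) :
    indSum (fun n => PySem.Int.mod n b = 0) xs
    = indSum (fun n => PySem.Int.mod n a = 0 ∧ PySem.Int.mod n b = 0) xs
      + indSum (fun n => ¬ PySem.Int.mod n a = 0 ∧ PySem.Int.mod n b = 0) xs := by
  induction xs with
  | nil => simp [indSum]
  | cons h t ih =>
    simp only [indSum, List.map_cons, List.sum_cons] at *
    by_cases ha : PySem.Int.mod h a = 0 <;> by_cases hb : PySem.Int.mod h b = 0 <;>
      simp [ha, hb] <;> omega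

-- ===== VERDICT (by name: the statement is the Claim_ definition above) =====
theorem count_multiples_spec : Claim_equal_count_multiples := by
  intro seq a b _ _
  unfold Spec_count_multiples count_multiples count_multiples_alt
  rw [A_char]
  simp only [PySem.Dict.foldl_insert_getD_add_one_eq_counter, PySem.Dict.items_counter, B_fold]
  have hnodup : (PySem.Set.ofList seq).Nodup := PySem.Set.nodup_ofList seq
  have hmem : ∀ x ∈ seq, x ∈ PySem.Set.ofList seq := fun x hx => (PySem.Set.mem_ofList seq x).mpr hx
  have key : ∀ (p : Int → Prop) [DecidablePred p],
      ((((PySem.Set.ofList seq).map (fun k => (k, (seq.count k : Int)))).map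
        (fun kc => if p kc.1 then kc.2 else 0))).sum = indSum p seq := by
    intro p _
    rw [List.map_map]
    exact counter_sum p (PySem.Set.ofList seq) seq hnodup hmem
  rw [key (fun n => PySem.Int.mod n a = 0), key (fun n => PySem.Int.mod n b = 0),
      key (fun n => PySem.Int.mod n a = 0 ∧ PySem.Int.mod n b = 0)]
  have := indSum_split a b seq
  simp only [Prod.mk.injEq]
  refine ⟨trivial, by linarith, trivial⟩
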